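-- pv_equiv track=rewrite | github.com/kidding1412/DEGNN | src/co_test.py | process_list
-- ===== SOURCE A (Python) =====
-- def process_list(list1):
--     new_list = []
--     num_list = []
--     first_dict = {}
--     # 遍历list，提取每个特征和齐对应的数字，将其作为键值对存入dict，将数字存入list。
--     for item in list1:
--         n = item[0]*100+item[1]*10+item[2]
--         num_list.append(n)
--         first_dict[n] = item
--     # num_list去重，排序
--     num_list = list(set(num_list))
--     num_list.sort()
--     for i in range(len(num_list)):
--         feature = first_dict[num_list[i]]
--         new_list.append(feature)
--     return new_list
-- ===== SOURCE B (Python) =====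
-- def process_list(list1):
--     def keyf(it):
--         return it[0] * 100 + it[1] * 10 + it[2]
--     s = sorted(list1, key=keyf)
--     out = []
--     prev = None
--     for it in s:
--         if prev is not None and keyf(prev) != keyf(it):
--             out.append(prev)
--         prev = it
--     if prev is not None:
--         out.append(prev)
--     return out
-- ===== Notes on version B (the rewrite author's own statement) =====
-- stated objective: alternative
-- what changed: Replaces the dict index + set-dedup + lookup loop with a stable sort by the encoded key followed by one linear pass that keeps the last item of each run of equal keys.
import Mathlib
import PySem

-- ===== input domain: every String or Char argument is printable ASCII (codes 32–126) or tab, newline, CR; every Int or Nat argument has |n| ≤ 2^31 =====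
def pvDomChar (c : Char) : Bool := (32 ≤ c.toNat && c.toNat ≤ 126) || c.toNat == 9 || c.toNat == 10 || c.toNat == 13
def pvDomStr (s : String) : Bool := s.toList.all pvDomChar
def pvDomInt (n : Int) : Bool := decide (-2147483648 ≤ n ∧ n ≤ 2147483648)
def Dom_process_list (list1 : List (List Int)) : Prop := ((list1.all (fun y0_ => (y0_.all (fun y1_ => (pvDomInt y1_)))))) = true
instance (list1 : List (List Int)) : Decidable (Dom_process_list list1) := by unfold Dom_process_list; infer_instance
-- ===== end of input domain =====

-- B replaces A's dict index + set-dedup + lookup loop by a stable sort on the encoded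
-- key and one linear pass keeping the last item of each run of equal keys (objective:
-- alternative; same asymptotic cost).

-- ===== PORT A =====
-- item[0]*100 + item[1]*10 + item[2]  (indices in range under Pre_, where Python A returns)
def pvKey (item : List Int) : Int :=
  PySem.List.pyGetD item 0 0 * 100 + PySem.List.pyGetD item 1 0 * 10 + PySem.List.pyGetD item 2 0

def process_list (list1 : List (List Int)) : List (List Int) :=
  -- first loop: num_list.append(n); first_dict[n] = item
  let st := list1.foldl
    (fun (acc : List Int × PySem.Dict Int (List Int)) item =>
      (acc.1 ++ [pvKey item], acc.2.insert (pvKey item) item))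
    ([], PySem.Dict.empty)
  -- num_list = list(set(num_list)); num_list.sort()   (set iteration order is irrelevant: sorted next)
  let num_list := PySem.List.sorted (PySem.Set.ofList st.1) (fun x => x)
  -- for i in range(len(num_list)): new_list.append(first_dict[num_list[i]])  (key always present)
  (PySem.List.pyRange 0 (num_list.length : Int)).foldl
    (fun new_list i => new_list ++ [((st.2.get? (PySem.List.pyGetD num_list i 0)).getD [])]) []

-- ===== PORT B =====
-- the body of B's 'for it in s' loop: state = (out, prev)
def pvStep (acc : List (List Int) × Option (List Int)) (it : List Int) :
    List (List Int) × Option (List Int) :=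
  match acc.2 with
  | some prev => if pvKey prev ≠ pvKey it then (acc.1 ++ [prev], some it) else (acc.1, some it)
  | none => (acc.1, some it)

def process_list_alt (list1 : List (List Int)) : List (List Int) :=
  let s := PySem.List.sorted list1 pvKey
  let st := s.foldl pvStep ([], none)
  match st.2 with
  | some prev => st.1 ++ [prev]
  | none => st.1

-- ===== PRECONDITION & SPEC =====
-- A raises IndexError (item[0]/item[1]/item[2]) on any item of length < 3; exactly those inputs are excluded.
def Pre_process_list (list1 : List (List Int)) : Prop := ∀ item ∈ list1, 3 ≤ item.length
instance (list1 : List (List Int)) : Decidable (Pre_process_list list1) := by unfold Pre_process_list; infer_instance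
def pvWitness_process_list : List (List Int) := [[1, 2, 3], [0, 0, 0], [1, 2, 3, 9]]

def Spec_process_list (list1 : List (List Int)) (out : List (List Int)) : Prop := out = process_list_alt list1
instance (list1 : List (List Int)) (out : List (List Int)) : Decidable (Spec_process_list list1 out) := by unfold Spec_process_list; infer_instance

-- ===== CLAIM (what is proved, stated in full; the proofs are below) =====
def Claim_equal_process_list : Prop := ∀ (list1 : List (List Int)), Dom_process_list list1 → Pre_process_list list1 → Spec_process_list list1 (process_list list1)

-- ===== LEMMAS AND PROOFS =====

-- B's run-collapsing pass, as a structural recursion (keep the last of each equal-key run)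
def pvRunLast : List (List Int) → List (List Int)
  | [] => []
  | [a] => [a]
  | a :: b :: t => if pvKey a = pvKey b then pvRunLast (b :: t) else a :: pvRunLast (b :: t)

theorem pvGetLastCons {α : Type} (a : α) (l : List α) :
    (a :: l).getLast? = l.getLast?.or (some a) := by
  cases hl : l.getLast? with
  | none => rw [List.getLast?_eq_none_iff] at hl; subst hl; rfl
  | some q => rw [List.getLast?_cons, hl]; rfl

-- A's first loop, with the pair state split into its two components
theorem pvFoldlA (l : List (List Int)) (ns : List Int) (d : PySem.Dict Int (List Int)) :
    l.foldl (fun acc item => (acc.1 ++ [pvKey item], acc.2.insert (pvKey item) item)) (ns, d)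
      = (ns ++ l.map pvKey, l.foldl (fun d it => d.insert (pvKey it) it) d) := by
  induction l generalizing ns d with
  | nil => simp
  | cons a l ih => simp [ih]

-- A's dict: lookup returns the LAST item inserted at that key
theorem pvDictGet (l : List (List Int)) (d : PySem.Dict Int (List Int)) (n : Int) :
    (l.foldl (fun d it => d.insert (pvKey it) it) d).get? n
      = ((l.filter (fun it => pvKey it == n)).getLast?).or (d.get? n) := by
  induction l generalizing d with
  | nil => simp
  | cons a l ih =>
    rw [List.foldl_cons, ih, List.filter_cons]
    by_cases h : pvKey a = n
    · rw [if_pos (by simp [h]), pvGetLastCons, Option.or_assoc,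
        PySem.Dict.get?_insert, if_pos h.symm]
      cases (l.filter (fun it => pvKey it == n)).getLast? <;> rfl
    · rw [if_neg (by simp [h]), PySem.Dict.get?_insert, if_neg (fun hc => h hc.symm)]

-- B's loop computes pvRunLast
theorem pvFoldB (t : List (List Int)) (out : List (List Int)) (p : List Int) :
    (match (t.foldl pvStep (out, some p)).2 with
     | some prev => (t.foldl pvStep (out, some p)).1 ++ [prev]
     | none => (t.foldl pvStep (out, some p)).1) = out ++ pvRunLast (p :: t) := by
  induction t generalizing out p with
  | nil => simp [pvRunLast]
  | cons b t ih =>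
    rw [List.foldl_cons]
    by_cases h : pvKey p = pvKey b
    · rw [show pvStep (out, some p) b = (out, some b) from by simp [pvStep, h]]
      rw [ih, pvRunLast, if_pos h]
    · rw [show pvStep (out, some p) b = (out ++ [p], some b) from by simp [pvStep, h]]
      rw [ih, pvRunLast, if_neg h]
      simp

-- stability of the sort, per key-class: filtering through insertBy
theorem pvFiltInsertByNe (x : List Int) (ys : List (List Int)) (k : Int) (h : ¬ pvKey x = k) :
    (PySem.List.insertBy (fun a b => decide (pvKey a < pvKey b)) x ys).filter (fun it => pvKey it == k)
      = ys.filter (fun it => pvKey it == k) := by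
  induction ys with
  | nil => simp [PySem.List.insertBy, h]
  | cons y ys ih =>
    rw [PySem.List.insertBy]
    by_cases hb : pvKey x < pvKey y
    · simp [hb, List.filter_cons, h]
    · simp only [hb, decide_false, Bool.false_eq_true, if_false, List.filter_cons]
      rw [ih]

theorem pvFiltInsertByEq (x : List Int) (ys : List (List Int))
    (h : ys.Pairwise (fun a b => pvKey a ≤ pvKey b)) :
    (PySem.List.insertBy (fun a b => decide (pvKey a < pvKey b)) x ys).filter (fun it => pvKey it == pvKey x)
      = ys.filter (fun it => pvKey it == pvKey x) ++ [x] := by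
  induction ys with
  | nil => simp [PySem.List.insertBy]
  | cons y ys ih =>
    rw [PySem.List.insertBy]
    by_cases hb : pvKey x < pvKey y
    · -- x goes in front; everything in y :: ys has key ≥ key y > key x, so its filter is empty
      have hemp : (y :: ys).filter (fun it => pvKey it == pvKey x) = [] := by
        rw [List.filter_eq_nil_iff]
        intro a ha
        have : pvKey y ≤ pvKey a := by
          rcases List.mem_cons.mp ha with rfl | ha2
          · exact le_refl _
          · exact (List.pairwise_cons.mp h).1 a ha2
        simp; omega
      simp only [hb, decide_true, if_true, List.filter_cons, hemp]
      simp
    · simp only [hb, decide_false, Bool.false_eq_true, if_false, List.filter_cons]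
      rw [ih (List.pairwise_cons.mp h).2]
      by_cases hy : pvKey y = pvKey x <;> simp [hy]

-- stability: each key-class of sorted(xs, key) is the key-class of xs, in order
theorem pvFilterSorted (xs : List (List Int)) (k : Int) :
    (PySem.List.sorted xs pvKey).filter (fun it => pvKey it == k) = xs.filter (fun it => pvKey it == k) := by
  induction xs using List.reverseRecOn with
  | nil => rfl
  | append_singleton xs x ih =>
    have hs : PySem.List.sorted (xs ++ [x]) pvKey
        = PySem.List.insertBy (fun a b => decide (pvKey a < pvKey b)) x (PySem.List.sorted xs pvKey) := by
      rw [PySem.List.sorted_eq_foldl_insertBy, List.foldl_append, ← PySem.List.sorted_eq_foldl_insertBy]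
      rfl
    rw [hs, List.filter_append]
    by_cases h : pvKey x = k
    · subst h
      rw [pvFiltInsertByEq x _ (PySem.List.sorted_pairwise xs pvKey), ih]
      simp
    · rw [pvFiltInsertByNe x _ k h, ih]
      simp [h]

-- set(x :: l) = x followed by set(l) without x
theorem pvOfListCons (x : Int) (l : List Int) :
    PySem.Set.ofList (x :: l) = x :: (PySem.Set.ofList l).filter (fun y => y != x) := by
  have h1 : (x :: l) = [x] ++ l := rfl
  have h2 : PySem.Set.ofList [x] = [x] := rfl
  rw [h1, PySem.Set.ofList_append, h2, PySem.Set.update_eq_append_filter]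
  rw [List.singleton_append, List.cons_inj_right]
  exact List.filter_congr (fun a _ => by simp [PySem.Set.contains, bne]; rfl)

-- the distinct elements of a nondecreasing list are strictly increasing
theorem pvDedupPairwiseLt (m : List Int) (h : m.Pairwise (· ≤ ·)) :
    (PySem.Set.ofList m).Pairwise (· < ·) := by
  induction m with
  | nil => simp [PySem.Set.ofList]
  | cons x l ih =>
    rw [pvOfListCons]
    constructor
    · intro y hy
      have hmem : y ∈ PySem.Set.ofList l := List.mem_of_mem_filter hy
      have hne : y ≠ x := by simpa using List.of_mem_filter hy
      have : y ∈ l := (PySem.Set.mem_ofList l y).mp hmem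
      have := (List.pairwise_cons.mp h).1 y this
      omega
    · exact List.Pairwise.filter _ (ih (List.pairwise_cons.mp h).2)

-- central lemma: on a key-nondecreasing list, the run-collapsing pass returns,
-- for each distinct key in (already sorted) first-occurrence order, the last element of its key-class
theorem pvRunLastEq (s : List (List Int)) : s.Pairwise (fun a b => pvKey a ≤ pvKey b) →
    pvRunLast s = (PySem.Set.ofList (s.map pvKey)).map
      (fun k => ((s.filter (fun it => pvKey it == k)).getLast?).getD []) := by
  induction s using pvRunLast.induct with
  | case1 => intro _; rfl
  | case2 a =>
    intro _
    rw [pvRunLast, List.map_cons, List.map_nil,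
      show PySem.Set.ofList [pvKey a] = [pvKey a] from rfl]
    simp
  | case3 a b t heq ih =>
    intro h
    rw [pvRunLast, if_pos heq]
    rw [ih (List.pairwise_cons.mp h).2]
    have hset : PySem.Set.ofList ((a :: b :: t).map pvKey) = PySem.Set.ofList ((b :: t).map pvKey) := by
      simp only [List.map_cons, heq]
      rw [PySem.Set.ofList_eq_foldl, PySem.Set.ofList_eq_foldl]
      simp only [List.foldl_cons]
      congr 1
      simp [PySem.Set.add, PySem.Set.contains]
    rw [hset]
    refine List.map_congr_left (fun k _ => ?_)
    by_cases hk : pvKey a = k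
    · have hb : pvKey b = k := heq ▸ hk
      rw [List.filter_cons_of_pos (by simp [hb]), List.filter_cons_of_pos (by simp [hk]),
        List.filter_cons_of_pos (by simp [hb]), List.getLast?_cons_cons]
    · conv_rhs => rw [List.filter_cons_of_neg (by simp [hk])]
  | case4 a b t hne ih =>
    intro h
    have hab : pvKey a ≤ pvKey b := (List.pairwise_cons.mp h).1 b (by simp)
    have hlt : ∀ y ∈ b :: t, pvKey a < pvKey y := by
      intro y hy
      rcases List.mem_cons.mp hy with rfl | hy2
      · omega
      · have := (List.pairwise_cons.mp (List.pairwise_cons.mp h).2).1 y hy2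
        omega
    rw [pvRunLast, if_neg hne]
    rw [ih (List.pairwise_cons.mp h).2]
    have hset : PySem.Set.ofList ((a :: b :: t).map pvKey)
        = pvKey a :: PySem.Set.ofList ((b :: t).map pvKey) := by
      rw [List.map_cons, pvOfListCons]
      congr 1
      refine List.filter_eq_self.mpr (fun y hy => ?_)
      have : y ∈ (b :: t).map pvKey := (PySem.Set.mem_ofList _ _).mp hy
      rcases List.mem_map.mp this with ⟨z, hz, rfl⟩
      have := hlt z hz
      simp [bne]; omega
    rw [hset, List.map_cons]
    congr 1
    · -- head entry: the only item with key (pvKey a) is a itself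
      have hemp : (b :: t).filter (fun it => pvKey it == pvKey a) = [] := by
        refine List.filter_eq_nil_iff.mpr (fun y hy => ?_)
        have := hlt y hy
        simp; omega
      show a = (List.filter (fun it => pvKey it == pvKey a) (a :: b :: t)).getLast?.getD []
      rw [List.filter_cons_of_pos (by simp), hemp]
      rfl
    · refine List.map_congr_left (fun k hk => ?_)
      have : k ∈ (b :: t).map pvKey := (PySem.Set.mem_ofList _ _).mp hk
      rcases List.mem_map.mp this with ⟨z, hz, rfl⟩
      have := hlt z hz
      conv_rhs => rw [List.filter_cons_of_neg (by simp; omega)]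

-- A as a closed map over the sorted distinct keys
theorem pvAEq (list1 : List (List Int)) :
    process_list list1
      = (PySem.List.sorted (PySem.Set.ofList (list1.map pvKey)) (fun x => x)).map
          (fun n => ((list1.filter (fun it => pvKey it == n)).getLast?).getD []) := by
  simp only [process_list, pvFoldlA, List.nil_append]
  rw [PySem.List.foldl_pyRange_zero_pyGetD'
    (PySem.List.sorted (PySem.Set.ofList (List.map pvKey list1)) (fun x => x)) 0
    (fun new_list v =>
      new_list ++
        [((List.foldl (fun d it => d.insert (pvKey it) it) PySem.Dict.empty list1).get? v).getD []])
    []]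
  rw [PySem.List.foldl_append_singleton_eq_map, List.nil_append]
  exact List.map_congr_left (fun k _ => by
    rw [pvDictGet, PySem.Dict.get?_empty, Option.or_none])

-- B is the run-collapsing pass over the stable sort
theorem pvBEq (list1 : List (List Int)) :
    process_list_alt list1 = pvRunLast (PySem.List.sorted list1 pvKey) := by
  simp only [process_list_alt]
  cases hs : PySem.List.sorted list1 pvKey with
  | nil => rfl
  | cons x xs =>
    rw [List.foldl_cons]
    rw [show pvStep ([], none) x = ([], some x) from rfl]
    exact pvFoldB xs [] x

theorem pvMain (list1 : List (List Int)) : process_list list1 = process_list_alt list1 := by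
  have hpair : (PySem.List.sorted list1 pvKey).Pairwise (fun a b => pvKey a ≤ pvKey b) :=
    PySem.List.sorted_pairwise list1 pvKey
  rw [pvAEq, pvBEq, pvRunLastEq _ hpair]
  have hkeys : PySem.List.sorted (PySem.Set.ofList (list1.map pvKey)) (fun x => x)
      = PySem.Set.ofList ((PySem.List.sorted list1 pvKey).map pvKey) := by
    apply PySem.List.sorted_eq_of_perm_of_pairwise_lt
    · apply (List.perm_ext_iff_of_nodup (PySem.Set.nodup_ofList _) (PySem.Set.nodup_ofList _)).mpr
      intro a
      rw [PySem.Set.mem_ofList, PySem.Set.mem_ofList]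
      exact List.Perm.mem_iff (List.Perm.map pvKey (PySem.List.sorted_perm list1 pvKey false))
    · exact pvDedupPairwiseLt _ (List.pairwise_map.mpr hpair)
  rw [hkeys]
  exact List.map_congr_left (fun k _ => by rw [pvFilterSorted])

-- ===== VERDICT (by name: the statement is the Claim_ definition above) =====
theorem process_list_spec : Claim_equal_process_list := by
  intro list1 _ _
  exact pvMain list1
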